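-- pv_equiv track=rewrite | github.com/AndreiHondrari/software-engineering-exploration | data_structures_and_algorithms/02_arrays/10_05_01_merge_two_arrays_ordering_by_criteria.py | merge_by_criteria
-- ===== SOURCE A (Python) =====
-- from typing import List
--
-- def merge_by_criteria(
--     array1: List[int],
--     array2: List[int],
-- ) -> List[int]:
--     A1SIZE: int = len(array1)
--     A2SIZE: int = len(array2)
--     MAX_SIZE: int = max(A1SIZE, A2SIZE)
--     MIN_SIZE: int = min(A1SIZE, A2SIZE)
--
--     array3: List[int] = []
--     first: int
--     second: int
--
--     for i in range(MAX_SIZE):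
--         # if only one array has elements
--         # then take from that array
--         if i >= MIN_SIZE:
--             if i < A1SIZE:
--                 array3.append(array1[i])
--
--             if i < A2SIZE:
--                 array3.append(array2[i])
--
--         # if both arrays have elements, compare
--         else:
--             if array1[i] < array2[i]:
--                 first = array1[i]
--                 second = array2[i]
--             else:
--                 first = array2[i]
--                 second = array1[i]
--
--             array3.append(first)
--             array3.append(second)
--
--     return array3
-- ===== SOURCE B (Python) =====
-- def merge_by_criteria(array1, array2):
--     it1, it2 = iter(array1), iter(array2)
--     array3 = []
--     while True:
--         try:
--             a = next(it1)
--         except StopIteration: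
--             array3.extend(it2)
--             return array3
--         try:
--             b = next(it2)
--         except StopIteration:
--             array3.append(a)
--             array3.extend(it1)
--             return array3
--         array3 += [a, b] if a <= b else [b, a]
-- ===== Notes on version B (the rewrite author's own statement) =====
-- stated objective: alternative
-- what changed: Replaces A's index loop over range(max(len1,len2)) with length/MIN_SIZE branching by an iterator-driven two-stream consumer: repeatedly next() both iterators, emit the pair in order, and on StopIteration drain the surviving iterator; no indices, lengths or slices are used.
import Mathlib
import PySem

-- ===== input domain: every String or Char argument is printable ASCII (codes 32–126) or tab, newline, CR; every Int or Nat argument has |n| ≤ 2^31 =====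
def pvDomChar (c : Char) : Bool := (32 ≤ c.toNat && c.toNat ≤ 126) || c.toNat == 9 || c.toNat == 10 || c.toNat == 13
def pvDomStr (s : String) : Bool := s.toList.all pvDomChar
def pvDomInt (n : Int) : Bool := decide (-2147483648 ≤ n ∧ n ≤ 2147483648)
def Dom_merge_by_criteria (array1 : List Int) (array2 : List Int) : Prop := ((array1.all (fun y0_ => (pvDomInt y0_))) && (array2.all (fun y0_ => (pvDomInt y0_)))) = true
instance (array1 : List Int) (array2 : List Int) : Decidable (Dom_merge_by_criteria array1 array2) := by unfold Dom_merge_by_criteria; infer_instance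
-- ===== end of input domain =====

-- B replaces A's length-and-index loop by an iterator-driven two-stream consumer
-- (pull a head from each side, emit the pair in order, drain the survivor on
-- exhaustion); objective: alternative. A = B is proved on the whole domain.

-- ===== PORT A =====
-- Literal port of A: one loop over range(MAX_SIZE); array accesses array1[i]/array2[i]
-- are ported as pyGetD … 0, exact here because every access is guarded by i < len.
def merge_by_criteria (array1 : List Int) (array2 : List Int) : List Int :=
  let A1SIZE : Int := array1.length
  let A2SIZE : Int := array2.length
  let MAX_SIZE : Int := max A1SIZE A2SIZE
  let MIN_SIZE : Int := min A1SIZE A2SIZE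
  (PySem.List.pyRange 0 MAX_SIZE 1).foldl (fun array3 i =>
    if MIN_SIZE ≤ i then
      let array3 := if i < A1SIZE then array3 ++ [PySem.List.pyGetD array1 i 0] else array3
      if i < A2SIZE then array3 ++ [PySem.List.pyGetD array2 i 0] else array3
    else
      if PySem.List.pyGetD array1 i 0 < PySem.List.pyGetD array2 i 0 then
        array3 ++ [PySem.List.pyGetD array1 i 0] ++ [PySem.List.pyGetD array2 i 0]
      else
        array3 ++ [PySem.List.pyGetD array2 i 0] ++ [PySem.List.pyGetD array1 i 0]) []

-- ===== PORT B =====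
-- Literal port of B: the two Python iterators are the two suffix lists still to be
-- consumed; next() is the head pattern-match, StopIteration is the [] case, and
-- extend(it) appends the surviving suffix. The while-loop is the recursion.
def mergeAltLoop (array3 : List Int) (it1 : List Int) (it2 : List Int) : List Int :=
  match it1, it2 with
  | [], rest2 => array3 ++ rest2
  | a :: rest1, [] => (array3 ++ [a]) ++ rest1
  | a :: rest1, b :: rest2 =>
      mergeAltLoop (array3 ++ (if a ≤ b then [a, b] else [b, a])) rest1 rest2

def merge_by_criteria_alt (array1 : List Int) (array2 : List Int) : List Int :=
  mergeAltLoop [] array1 array2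

-- ===== PRECONDITION & SPEC =====
def Spec_merge_by_criteria (array1 : List Int) (array2 : List Int) (out : List Int) : Prop := out = merge_by_criteria_alt array1 array2
instance (array1 : List Int) (array2 : List Int) (out : List Int) : Decidable (Spec_merge_by_criteria array1 array2 out) := by unfold Spec_merge_by_criteria; infer_instance

-- ===== CLAIM (what is proved, stated in full; the proofs are below) =====
def Claim_equal_merge_by_criteria : Prop := ∀ (array1 : List Int) (array2 : List Int), Dom_merge_by_criteria array1 array2 → Spec_merge_by_criteria array1 array2 (merge_by_criteria array1 array2)

-- ===== LEMMAS AND PROOFS =====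

-- what A's loop body emits at (Nat) index k, as a pure function of the input
def emitA (array1 : List Int) (array2 : List Int) (k : Nat) : List Int :=
  if min array1.length array2.length ≤ k then
    (if k < array1.length then [array1.getD k 0] else []) ++
    (if k < array2.length then [array2.getD k 0] else [])
  else
    if array1.getD k 0 < array2.getD k 0 then
      [array1.getD k 0, array2.getD k 0]
    else
      [array2.getD k 0, array1.getD k 0]

lemma foldl_emit {α β : Type} (f : List β → α → List β) (g : α → List β)
    (h : ∀ acc x, f acc x = acc ++ g x) :
    ∀ (l : List α) (acc : List β), l.foldl f acc = acc ++ l.flatMap g := by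
  intro l
  induction l with
  | nil => intro acc; simp
  | cons x xs ih => intro acc; simp [List.foldl_cons, h, ih]

lemma emitA_succ (x y : Int) (xs ys : List Int) (k : Nat) :
    emitA (x :: xs) (y :: ys) (k + 1) = emitA xs ys k := by
  simp [emitA, Nat.succ_min_succ]

lemma emitA_succ_left (x : Int) (xs : List Int) (k : Nat) :
    emitA (x :: xs) [] (k + 1) = emitA xs [] k := by
  simp [emitA]

lemma emitA_succ_right (y : Int) (ys : List Int) (k : Nat) :
    emitA [] (y :: ys) (k + 1) = emitA [] ys k := by
  simp [emitA]

lemma A_eq_flatMap (array1 array2 : List Int) :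
    merge_by_criteria array1 array2 =
      (List.range (max array1.length array2.length)).flatMap (emitA array1 array2) := by
  unfold merge_by_criteria
  rw [foldl_emit _ (fun i =>
      if (min (array1.length : Int) (array2.length : Int)) ≤ i then
        (if i < (array1.length : Int) then [PySem.List.pyGetD array1 i 0] else []) ++
        (if i < (array2.length : Int) then [PySem.List.pyGetD array2 i 0] else [])
      else
        if PySem.List.pyGetD array1 i 0 < PySem.List.pyGetD array2 i 0 then
          [PySem.List.pyGetD array1 i 0, PySem.List.pyGetD array2 i 0]
        else
          [PySem.List.pyGetD array2 i 0, PySem.List.pyGetD array1 i 0])]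
  · rw [PySem.List.pyRange_one]
    have hmax : ((max (array1.length : Int) (array2.length : Int)) - 0).toNat
        = max array1.length array2.length := by omega
    rw [hmax, List.flatMap_map]
    simp only [List.nil_append]
    apply List.flatMap_congr
    intro k _
    simp only [zero_add, emitA, PySem.List.pyGetD_natCast]
    have h1 : ((min (array1.length : Int) (array2.length : Int)) ≤ (k : Int))
        ↔ min array1.length array2.length ≤ k := by omega
    have h2 : ((k : Int) < (array1.length : Int)) ↔ k < array1.length := by omega
    have h3 : ((k : Int) < (array2.length : Int)) ↔ k < array2.length := by omega
    simp only [h1, h2, h3]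
  · intro acc i
    split_ifs with h1 h2 h3 h4 h5 <;> simp

lemma flat_nil_left : ∀ (ys : List Int),
    (List.range ys.length).flatMap (emitA [] ys) = ys := by
  intro ys
  induction ys with
  | nil => simp
  | cons y ys ih =>
    simp only [List.length_cons, List.range_succ_eq_map, List.flatMap_cons, List.flatMap_map]
    have h0 : emitA [] (y :: ys) 0 = [y] := by simp [emitA]
    rw [h0, show (fun a => emitA [] (y :: ys) a.succ) = emitA [] ys from
      funext fun k => emitA_succ_right y ys k]
    simp_all

lemma flat_nil_right : ∀ (xs : List Int),
    (List.range xs.length).flatMap (emitA xs []) = xs := by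
  intro xs
  induction xs with
  | nil => simp
  | cons x xs ih =>
    simp only [List.length_cons, List.range_succ_eq_map, List.flatMap_cons, List.flatMap_map]
    have h0 : emitA (x :: xs) [] 0 = [x] := by simp [emitA]
    rw [h0, show (fun a => emitA (x :: xs) [] a.succ) = emitA xs [] from
      funext fun k => emitA_succ_left x xs k]
    simp_all

lemma altLoop_eq : ∀ (xs ys acc : List Int),
    mergeAltLoop acc xs ys =
      acc ++ (List.range (max xs.length ys.length)).flatMap (emitA xs ys) := by
  intro xs
  induction xs with
  | nil =>
    intro ys acc
    simp [mergeAltLoop, flat_nil_left]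
  | cons x xs ih =>
    intro ys acc
    cases ys with
    | nil =>
      have h := flat_nil_right (x :: xs)
      simp only [List.length_cons] at h
      simp [mergeAltLoop, h]
    | cons y ys =>
      have h0 : emitA (x :: xs) (y :: ys) 0 = if x ≤ y then [x, y] else [y, x] := by
        by_cases hxy : x < y
        · simp [emitA, hxy, hxy.le]
        · have hyx : y ≤ x := not_lt.mp hxy
          by_cases hxe : x ≤ y
          · have : x = y := le_antisymm hxe hyx
            simp [emitA, this]
          · simp [emitA, hxy, hxe]
      simp only [mergeAltLoop, ih, List.length_cons, Nat.succ_max_succ,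
        List.range_succ_eq_map, List.flatMap_cons, List.flatMap_map, h0,
        show (fun a => emitA (x :: xs) (y :: ys) a.succ) = emitA xs ys from
          funext fun k => emitA_succ x y xs ys k]
      simp

-- ===== VERDICT (by name: the statement is the Claim_ definition above) =====
theorem merge_by_criteria_spec : Claim_equal_merge_by_criteria := by
  intro array1 array2 _
  unfold Spec_merge_by_criteria merge_by_criteria_alt
  rw [A_eq_flatMap, altLoop_eq]
  simp
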